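-- pv_equiv track=rewrite | github.com/namjii/study | quiz/p202.py | solution23
-- ===== SOURCE A (Python) =====
-- def solution23(list):
--     '''
--     - Input : -1 1 3 -2 2
--     - Output : -1 -2 1 3 2
--
--     input : 1 -2 3 -1 2
--     output : -2 -1 1 3 2
--     '''
--     index = 0
--     for i in range(len(list)):
--         if list[index] > 0:
--             pop = list.pop(index)
--             list.append(pop)
--         else:
--             index += 1
--     return list
-- ===== SOURCE B (Python) =====
-- def solution23(list):
--     nonpos = []
--     pos = []
--     for x in list:
--         if x > 0:
--             pos.append(x)
--         else:
--             nonpos.append(x)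
--     return nonpos + pos
-- ===== Notes on version B (the rewrite author's own statement) =====
-- stated objective: faster
-- what changed: Replaces the quadratic pop/append in-place shuffle with a single pass that buckets elements into a non-positive list and a positive list and concatenates them (A mutates its argument in place, B does not; return value is identical).
import Mathlib
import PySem

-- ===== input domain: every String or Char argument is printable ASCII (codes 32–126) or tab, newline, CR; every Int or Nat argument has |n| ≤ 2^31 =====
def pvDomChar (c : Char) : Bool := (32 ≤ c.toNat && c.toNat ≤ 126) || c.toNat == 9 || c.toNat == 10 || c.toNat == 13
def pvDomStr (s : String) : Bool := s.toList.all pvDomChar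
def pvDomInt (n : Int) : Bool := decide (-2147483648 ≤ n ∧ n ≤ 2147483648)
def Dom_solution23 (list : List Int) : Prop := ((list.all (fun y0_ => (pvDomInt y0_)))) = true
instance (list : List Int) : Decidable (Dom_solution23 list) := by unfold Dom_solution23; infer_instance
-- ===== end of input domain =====

-- B replaces A's quadratic in-place pop/append shuffle by one linear pass into two buckets
-- (equivalence is about the RETURN value: A mutates its argument in place, B does not).


-- ===== PORT A =====
-- one iteration of A's for-loop body; state = (index, list).
-- The 'none' branches are unreachable (index is always in range; proved in the lemmas below),
-- so Python never raises here and the state is returned unchanged only formally.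
def solution23Step (s : Int × List Int) (_ : Int) : Int × List Int :=
  match PySem.List.pyGet? s.2 s.1 with
  | none => s
  | some v =>
    if v > 0 then
      match PySem.List.pop? s.2 s.1 with
      | none => s
      | some (p, rest) => (s.1, rest ++ [p])
    else (s.1 + 1, s.2)

def solution23 (list : List Int) : List Int :=
  ((PySem.List.pyRange 0 list.length 1).foldl solution23Step (0, list)).2

-- ===== PORT B =====
def solution23_alt (list : List Int) : List Int :=
  let p := list.foldl
    (fun (acc : List Int × List Int) x =>
      if x > 0 then (acc.1, acc.2 ++ [x]) else (acc.1 ++ [x], acc.2))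
    ([], [])
  p.1 ++ p.2

-- ===== PRECONDITION & SPEC =====
def Spec_solution23 (list : List Int) (out : List Int) : Prop := out = solution23_alt list
instance (list : List Int) (out : List Int) : Decidable (Spec_solution23 list out) := by unfold Spec_solution23; infer_instance

-- ===== CLAIM (what is proved, stated in full; the proofs are below) =====
def Claim_equal_solution23 : Prop := ∀ (list : List Int), Dom_solution23 list → Spec_solution23 list (solution23 list)

-- ===== LEMMAS AND PROOFS =====

-- list.pop(|P|) on P ++ r :: T removes exactly r.
theorem eraseIdx_append_cons (P T : List Int) (r : Int) :
    (P ++ r :: T).eraseIdx P.length = P ++ T := by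
  induction P with
  | nil => rfl
  | cons p P ih => simp [ih]

-- A's loop invariant: with index = |P|, list = P ++ R ++ Q and as many iterations left as |R|,
-- the final list is P, then the non-positives of R, then Q (positives already moved), then the positives of R.
theorem solution23_loop_inv (is : List Int) (P R Q : List Int) (h : is.length = R.length) :
    (is.foldl solution23Step ((P.length : Int), P ++ R ++ Q)).2
      = P ++ R.filter (fun x => x ≤ 0) ++ Q ++ R.filter (fun x => 0 < x) := by
  induction is generalizing P R Q with
  | nil =>
    cases R with
    | nil => simp
    | cons r R' => simp at h
  | cons i is ih =>
    cases R with
    | nil => simp at h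
    | cons r R' =>
      simp only [List.length_cons, Nat.add_right_cancel_iff] at h
      have hget : PySem.List.pyGet? (P ++ r :: R' ++ Q) (P.length : Int) = some r := by
        rw [PySem.List.pyGet?_natCast]
        simp
      by_cases hr : r > 0
      · have hpop : PySem.List.pop? (P ++ r :: R' ++ Q) (P.length : Int)
            = some (r, P ++ R' ++ Q) := by
          rw [PySem.List.pop?_natCast _ _ (by simp)]
          congr 1
          refine Prod.ext ?_ ?_
          · simp [List.getElem_append_right]
          · show List.eraseIdx _ _ = _
            rw [List.append_assoc, List.cons_append, eraseIdx_append_cons P (R' ++ Q) r]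
            simp [List.append_assoc]
        have hstep : solution23Step ((P.length : Int), P ++ r :: R' ++ Q) i
            = ((P.length : Int), P ++ R' ++ (Q ++ [r])) := by
          simp only [solution23Step, hget, hpop, if_pos hr]
          simp [List.append_assoc]
        rw [List.foldl_cons, hstep, ih P R' (Q ++ [r]) h]
        simp [hr]
      · have hstep : solution23Step ((P.length : Int), P ++ r :: R' ++ Q) i
            = (((P ++ [r]).length : Int), (P ++ [r]) ++ R' ++ Q) := by
          simp only [solution23Step, hget, if_neg hr]
          refine Prod.ext (by simp) (by simp)
        rw [List.foldl_cons, hstep, ih (P ++ [r]) R' Q h]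
        have hle : r ≤ 0 := not_lt.mp hr
        simp [hle, List.append_assoc]

-- B's fold builds exactly the two filters.
theorem solution23_alt_fold (xs N Pq : List Int) :
    xs.foldl
      (fun (acc : List Int × List Int) x =>
        if x > 0 then (acc.1, acc.2 ++ [x]) else (acc.1 ++ [x], acc.2)) (N, Pq)
    = (N ++ xs.filter (fun x => x ≤ 0), Pq ++ xs.filter (fun x => 0 < x)) := by
  induction xs generalizing N Pq with
  | nil => simp
  | cons x xs ih =>
    by_cases hx : x > 0
    · simp [hx, not_lt.mpr (le_of_lt hx), ih, List.append_assoc]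
    · simp [hx, not_lt.mp hx, ih, List.append_assoc]

-- ===== VERDICT (by name: the statement is the Claim_ definition above) =====
theorem solution23_spec : Claim_equal_solution23 := by
  intro list _
  unfold Spec_solution23 solution23 solution23_alt
  have h := solution23_loop_inv (PySem.List.pyRange 0 list.length 1) [] list []
    (by simp [PySem.List.length_pyRange_one])
  simpa [solution23_alt_fold] using h
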